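-- pv_equiv track=rewrite | github.com/ad-astra-per-ardua/Solving-Algorithm | 프로그래머스/unrated/140105. 쌍둥이 빌딩 숲/쌍둥이 빌딩 숲.py | solution
-- ===== SOURCE A (Python) =====
-- mod = 1000000007
--
-- def solution(n, count):
--     arr = [[0] * (count + 1) for _ in range(n + 1)]
--     arr[1][1] = 1
--
--     for row in range(2, n + 1):
--         prevRow = row - 1
--         nextColLength = min(count, row)
--
--         for col in range(1, nextColLength + 1):
--             arr[row][col] = (arr[prevRow][col - 1] + 2 * prevRow * arr[prevRow][col]) % mod
--     return arr[n][count]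
-- ===== SOURCE B (Python) =====
-- mod = 1000000007
--
-- def solution(n, count):
--     # Unsigned Stirling numbers of the first kind (factor 2 per building pulled out),
--     # single 1-D array updated in place right-to-left; the 2^(n-count) factor is
--     # restored once at the end with modular exponentiation.
--     if count > n:
--         return 0
--     s = [0] * (count + 1)
--     s[1] = 1
--     for row in range(2, n + 1):
--         prev = row - 1
--         for col in range(min(count, row), 0, -1):
--             s[col] = (s[col - 1] + prev * s[col]) % mod
--     return s[count] * pow(2, n - count, mod) % mod
-- ===== Notes on version B (the rewrite author's own statement) =====
-- stated objective: simpler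
-- what changed: Replaces the (n+1)x(count+1) DP table with the factor 2*(row-1) folded into every transition by a single in-place 1-D array of unsigned Stirling numbers of the first kind (updated right-to-left, no factor 2 in the loop), restoring the 2^(n-count) factor once at the end by modular exponentiation.
import Mathlib
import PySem

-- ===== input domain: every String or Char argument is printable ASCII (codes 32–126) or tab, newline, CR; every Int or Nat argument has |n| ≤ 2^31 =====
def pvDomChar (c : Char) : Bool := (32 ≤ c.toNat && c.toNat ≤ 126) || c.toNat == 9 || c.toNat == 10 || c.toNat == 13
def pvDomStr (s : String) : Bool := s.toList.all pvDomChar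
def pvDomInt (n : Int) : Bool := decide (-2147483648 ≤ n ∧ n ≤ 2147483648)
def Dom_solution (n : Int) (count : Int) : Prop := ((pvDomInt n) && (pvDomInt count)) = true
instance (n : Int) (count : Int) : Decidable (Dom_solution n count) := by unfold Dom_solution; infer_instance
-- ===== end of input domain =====

-- B replaces A's 2-D table over the recurrence arr[r][c] = arr[r-1][c-1] + 2(r-1)·arr[r-1][c]
-- with a single in-place 1-D Stirling-number array (no factor 2 in the loop) and one final
-- modular exponentiation 2^(n-count); objective: simpler (O(count) memory), same time class.

def pvMod : Int := 1000000007

-- ===== PORT A =====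
def solution (n : Int) (count : Int) : Int :=
  let arr := List.replicate (n + 1).toNat (List.replicate (count + 1).toNat (0 : Int))
  let arr := PySem.List.pySetD arr 1 (PySem.List.pySetD (PySem.List.pyGetD arr 1 []) 1 1)
  let arr := (PySem.List.pyRange 2 (n + 1) 1).foldl (fun arr row =>
    let prevRow := row - 1
    let nextColLength := min count row
    (PySem.List.pyRange 1 (nextColLength + 1) 1).foldl (fun arr col =>
      let v := PySem.Int.mod
        (PySem.List.pyGetD (PySem.List.pyGetD arr prevRow []) (col - 1) 0
          + 2 * prevRow * PySem.List.pyGetD (PySem.List.pyGetD arr prevRow []) col 0) pvMod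
      PySem.List.pySetD arr row (PySem.List.pySetD (PySem.List.pyGetD arr row []) col v)) arr) arr
  PySem.List.pyGetD (PySem.List.pyGetD arr n []) count 0

-- ===== PORT B =====
def solution_alt (n : Int) (count : Int) : Int :=
  if count > n then 0 else
    let s := PySem.List.pySetD (List.replicate (count + 1).toNat (0 : Int)) 1 1
    let s := (PySem.List.pyRange 2 (n + 1) 1).foldl (fun s row =>
      let prev := row - 1
      (PySem.List.pyRange (min count row) 0 (-1)).foldl (fun s col =>
        PySem.List.pySetD s col
          (PySem.Int.mod (PySem.List.pyGetD s (col - 1) 0 + prev * PySem.List.pyGetD s col 0) pvMod)) s) s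
    PySem.Int.mod (PySem.List.pyGetD s count 0 * PySem.Int.powMod 2 (n - count).toNat pvMod) pvMod

-- ===== PRECONDITION & SPEC =====
-- A raises IndexError when n < 1 (arr[1] missing) or count < 1 (rows are empty lists).
def Pre_solution (n : Int) (count : Int) : Prop := 1 ≤ n ∧ 1 ≤ count
instance (n : Int) (count : Int) : Decidable (Pre_solution n count) := by unfold Pre_solution; infer_instance
def pvWitness_solution : Int × Int := (5, 3)

def Spec_solution (n : Int) (count : Int) (out : Int) : Prop := out = solution_alt n count
instance (n : Int) (count : Int) (out : Int) : Decidable (Spec_solution n count out) := by unfold Spec_solution; infer_instance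

-- ===== CLAIM (what is proved, stated in full; the proofs are below) =====
def Claim_equal_solution : Prop := ∀ (n : Int) (count : Int), Dom_solution n count → Pre_solution n count → Spec_solution n count (solution n count)

-- ===== LEMMAS AND PROOFS =====

def stir : Nat → Nat → Nat
  | _, 0 => 0
  | 0, _+1 => 0
  | 1, c+1 => if c = 0 then 1 else 0
  | r+2, c+1 => stir (r+1) c + (r+1) * stir (r+1) (c+1)
lemma stir_gt : ∀ {r c : Nat}, r < c → stir r c = 0 := by
  intro r
  induction r with
  | zero => intro c h; cases c with | zero => omega | succ c => rfl
  | succ r ih =>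
    intro c h
    cases c with
    | zero => omega
    | succ c =>
      cases r with
      | zero =>
        have hc : c ≠ 0 := by omega
        simp [stir, hc]
      | succ r =>
        simp only [stir]
        rw [ih (by omega), ih (by omega)]
        simp
lemma stir_rec (R c : Nat) (hR : 1 ≤ R) (hc : 1 ≤ c) :
    stir (R+1) c = stir R (c-1) + R * stir R c := by
  obtain ⟨R, rfl⟩ : ∃ R', R = R' + 1 := ⟨R-1, by omega⟩
  obtain ⟨c, rfl⟩ : ∃ c', c = c' + 1 := ⟨c-1, by omega⟩
  simp [stir]
lemma emod_addmul (a k b M : Int) : (a % M + k * (b % M)) % M = (a + k * b) % M := by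
  conv_lhs => rw [Int.add_emod, Int.mul_emod]
  conv_rhs => rw [Int.add_emod, Int.mul_emod]
  rw [Int.emod_emod_of_dvd _ dvd_rfl, Int.emod_emod_of_dvd _ dvd_rfl]
def sval (r c : Nat) : Int := ((2 ^ (r - c) * stir r c : Nat) : Int) % pvMod
lemma sval_rec (R j : Nat) (hR : 1 ≤ R) (hjR : j ≤ R) :
    (sval R j + 2 * (R:Int) * sval R (j+1)) % pvMod = sval (R+1) (j+1) := by
  unfold sval
  rw [emod_addmul]
  have hrec := stir_rec (R := R) (c := j+1) hR (by omega)
  simp only [Nat.add_sub_cancel] at hrec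
  have h1 : R + 1 - (j+1) = R - j := by omega
  rw [h1, hrec]
  rcases Nat.lt_or_ge j R with h | h
  · have h2 : R - j = (R - (j+1)) + 1 := by omega
    rw [h2]
    congr 1
    push_cast
    ring
  · have hj : j = R := by omega
    rw [hj, stir_gt (by omega : R < R + 1)]
    congr 1

-- bodies (let-free forms of the port lambdas)
def innerBodyA (row : Int) (arr : List (List Int)) (col : Int) : List (List Int) :=
  PySem.List.pySetD arr row (PySem.List.pySetD (PySem.List.pyGetD arr row []) col
    (PySem.Int.mod (PySem.List.pyGetD (PySem.List.pyGetD arr (row - 1) []) (col - 1) 0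
      + 2 * (row - 1) * PySem.List.pyGetD (PySem.List.pyGetD arr (row - 1) []) col 0) pvMod))
def stepA (count : Int) (arr : List (List Int)) (row : Int) : List (List Int) :=
  (PySem.List.pyRange 1 (min count row + 1) 1).foldl (innerBodyA row) arr
def arrInitA (n count : Int) : List (List Int) :=
  let arr := List.replicate (n + 1).toNat (List.replicate (count + 1).toNat (0 : Int))
  PySem.List.pySetD arr 1 (PySem.List.pySetD (PySem.List.pyGetD arr 1 []) 1 1)

lemma solution_eq (n count : Int) : solution n count =
    PySem.List.pyGetD (PySem.List.pyGetD
      ((PySem.List.pyRange 2 (n + 1) 1).foldl (stepA count) (arrInitA n count)) n []) count 0 := rfl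

lemma innerA (C N R : Nat) (hR : 1 ≤ R) (hRN : R < N)
    (arr0 : List (List Int)) (hlen : arr0.length = N + 1)
    (hprev : ∀ c : Nat, c ≤ C →
      PySem.List.pyGetD (PySem.List.pyGetD arr0 (R : Int) []) (c : Int) 0 = sval R c)
    (hrow : PySem.List.pyGetD arr0 ((R : Int) + 1) [] = List.replicate (C + 1) 0) :
    ∀ j : Nat, j ≤ min C (R + 1) →
      ((PySem.List.pyRange 1 ((j : Int) + 1) 1).foldl (innerBodyA ((R : Int) + 1)) arr0).length = N + 1
      ∧ (∀ r : Nat, r ≠ R + 1 →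
          PySem.List.pyGetD ((PySem.List.pyRange 1 ((j : Int) + 1) 1).foldl (innerBodyA ((R : Int) + 1)) arr0) (r : Int) []
          = PySem.List.pyGetD arr0 (r : Int) [])
      ∧ (PySem.List.pyGetD ((PySem.List.pyRange 1 ((j : Int) + 1) 1).foldl (innerBodyA ((R : Int) + 1)) arr0) ((R : Int) + 1) []).length = C + 1
      ∧ (∀ c : Nat, c ≤ C →
          PySem.List.pyGetD (PySem.List.pyGetD ((PySem.List.pyRange 1 ((j : Int) + 1) 1).foldl (innerBodyA ((R : Int) + 1)) arr0) ((R : Int) + 1) []) (c : Int) 0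
          = if 1 ≤ c ∧ c ≤ j then sval (R + 1) c else 0) := by
  intro j
  induction j with
  | zero =>
    intro _
    rw [PySem.List.pyRange_one_eq_nil (by omega)]
    refine ⟨hlen, fun r _ => rfl, ?_, ?_⟩
    · show (PySem.List.pyGetD arr0 ((R : Int) + 1) []).length = C + 1
      rw [hrow]; simp
    · intro c hc
      show PySem.List.pyGetD (PySem.List.pyGetD arr0 ((R : Int) + 1) []) (c : Int) 0 = _
      rw [hrow]
      have h : ¬ (1 ≤ c ∧ c ≤ 0) := by omega
      rw [if_neg h]
      simp [List.getD, List.getElem?_replicate, hc]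
  | succ j ih =>
    intro hj1
    have hminC : min C (R + 1) ≤ C := by omega
    have hjC : j + 1 ≤ C := by omega
    have hjR : j ≤ R := by omega
    obtain ⟨ihlen, ihoth, ihrlen, ihent⟩ := ih (by omega)
    have hcast : ((j + 1 : Nat) : Int) + 1 = ((j : Int) + 1) + 1 := by push_cast; ring
    rw [hcast, PySem.List.pyRange_one_succ_right (by omega), List.foldl_append,
        List.foldl_cons, List.foldl_nil]
    set acc := (PySem.List.pyRange 1 ((j : Int) + 1) 1).foldl (innerBodyA ((R : Int) + 1)) arr0 with hacc
    -- evaluate the one extra step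
    have e1 : (R : Int) + 1 - 1 = (R : Int) := by ring
    have e2 : (j : Int) + 1 - 1 = (j : Int) := by ring
    have hprevacc : PySem.List.pyGetD acc (R : Int) [] = PySem.List.pyGetD arr0 (R : Int) [] :=
      ihoth R (by omega)
    have hread1 : PySem.List.pyGetD (PySem.List.pyGetD acc ((R : Int) + 1 - 1) []) ((j : Int) + 1 - 1) 0 = sval R j := by
      rw [e1, e2, hprevacc]; exact hprev j (by omega)
    have hread2 : PySem.List.pyGetD (PySem.List.pyGetD acc ((R : Int) + 1 - 1) []) ((j : Int) + 1) 0 = sval R (j + 1) := by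
      rw [e1, hprevacc]
      have : ((j : Int) + 1) = ((j + 1 : Nat) : Int) := by push_cast; ring
      rw [this]
      exact hprev (j + 1) hjC
    have hv : PySem.Int.mod
        (PySem.List.pyGetD (PySem.List.pyGetD acc ((R : Int) + 1 - 1) []) ((j : Int) + 1 - 1) 0
          + 2 * ((R : Int) + 1 - 1) * PySem.List.pyGetD (PySem.List.pyGetD acc ((R : Int) + 1 - 1) []) ((j : Int) + 1) 0) pvMod
        = sval (R + 1) (j + 1) := by
      rw [hread1, hread2, e1, PySem.Int.mod_eq_emod_of_pos (by norm_num [pvMod])]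
      exact sval_rec R j hR hjR
    show ((PySem.List.pySetD acc ((R : Int) + 1) _).length = N + 1) ∧ _
    unfold innerBodyA
    rw [hv]
    have ecast : (R : Int) + 1 = ((R + 1 : Nat) : Int) := by push_cast; ring
    have ecastj : (j : Int) + 1 = ((j + 1 : Nat) : Int) := by push_cast; ring
    set newrow := PySem.List.pySetD (PySem.List.pyGetD acc ((R : Int) + 1) []) ((j : Int) + 1) (sval (R + 1) (j + 1)) with hnewrow
    have hnewlen : newrow.length = C + 1 := by
      rw [hnewrow, PySem.List.length_pySetD, ihrlen]
    have houterNe : ∀ r : Nat, r ≠ R + 1 → PySem.List.pyGetD (PySem.List.pySetD acc ((R : Int) + 1) newrow) (r : Int) []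
        = PySem.List.pyGetD acc (r : Int) [] := by
      intro r hr
      rw [ecast, PySem.List.pyGetD_pySetD_natCast acc (R + 1) r newrow [] (by omega), if_neg hr]
    have houterEq : PySem.List.pyGetD (PySem.List.pySetD acc ((R : Int) + 1) newrow) ((R : Int) + 1) []
        = newrow := by
      rw [ecast, PySem.List.pyGetD_pySetD_natCast acc (R + 1) (R + 1) newrow [] (by omega), if_pos rfl]
    refine ⟨?_, ?_, ?_, ?_⟩
    · rw [PySem.List.length_pySetD]; exact ihlen
    · intro r hr
      rw [houterNe r hr]
      exact ihoth r hr
    · rw [houterEq]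
      exact hnewlen
    · intro c hc
      rw [houterEq, hnewrow, ecastj,
          PySem.List.pyGetD_pySetD_natCast _ (j + 1) c _ 0 (by omega)]
      by_cases hcj : c = j + 1
      · rw [if_pos hcj, hcj, if_pos (by omega)]
      · rw [if_neg hcj, ihent c hc]
        by_cases h1 : 1 ≤ c ∧ c ≤ j
        · rw [if_pos h1, if_pos (by omega)]
        · rw [if_neg h1, if_neg (by omega)]

lemma stir_zero (r : Nat) : stir r 0 = 0 := by cases r <;> rfl
lemma sval_eq_zero (r c : Nat) (h : c = 0 ∨ r < c) : sval r c = 0 := by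
  unfold sval
  rcases h with h | h
  · rw [h, stir_zero]; simp
  · rw [stir_gt h]; simp
lemma getD_replicate' {α : Type} (k i : Nat) (x d : α) (h : i < k) :
    (List.replicate k x).getD i d = x := by
  simp [List.getD, List.getElem?_replicate, h]

lemma getD_set_replicate (k i c : Nat) (v : Int) (hik : i < k) :
    ((List.replicate k (0:Int)).set i v).getD c 0 = if c = i then v else 0 := by
  by_cases h : c = i
  · subst h
    simp [List.getD, hik]
  · rw [if_neg h]
    rcases Nat.lt_or_ge c k with hk | hk
    · simp [List.getD, hk, Ne.symm h]
    · simp [List.getD, show ¬ c < k by omega]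

lemma initA_len (N C : Nat) (hN : 1 ≤ N) :
    (arrInitA (N : Int) (C : Int)).length = N + 1 := by
  unfold arrInitA
  rw [PySem.List.length_pySetD, List.length_replicate]
  omega

lemma initA_row (N C : Nat) (hN : 1 ≤ N) (hC : 1 ≤ C) : ∀ r : Nat, r ≤ N →
    PySem.List.pyGetD (arrInitA (N : Int) (C : Int)) (r : Int) []
    = if r = 1 then (List.replicate (C + 1) (0 : Int)).set 1 1 else List.replicate (C + 1) 0 := by
  intro r hr
  unfold arrInitA
  have hcnt : ((C : Int) + 1).toNat = C + 1 := by omega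
  have hn : ((N : Int) + 1).toNat = N + 1 := by omega
  rw [hcnt, hn]
  show PySem.List.pyGetD (PySem.List.pySetD (List.replicate (N + 1) (List.replicate (C + 1) (0:Int))) 1
      (PySem.List.pySetD (PySem.List.pyGetD (List.replicate (N + 1) (List.replicate (C + 1) (0:Int))) 1 []) 1 1)) (r : Int) [] = _
  simp only [PySem.List.pySetD_of_nonneg _ _ (by norm_num : (0:Int) ≤ 1),
             PySem.List.pyGetD_of_nonneg _ _ (by norm_num : (0:Int) ≤ 1),
             Int.toNat_one, PySem.List.pyGetD_natCast]
  have hget : (List.replicate (N+1) (List.replicate (C+1) (0:Int))).getD 1 [] = List.replicate (C+1) 0 := by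
    simp [List.getD, List.getElem?_replicate, show 1 < N + 1 by omega]
  rw [hget]
  by_cases h1 : r = 1
  · subst h1
    simp [List.getD, show 1 < N + 1 by omega]
  · rcases Nat.lt_or_ge r (N+1) with hk | hk
    · simp [List.getD, List.getElem?_replicate, hk, h1, Ne.symm h1]
    · omega

lemma row1_entries (C : Nat) (hC : 1 ≤ C) : ∀ c : Nat, c ≤ C →
    PySem.List.pyGetD ((List.replicate (C + 1) (0 : Int)).set 1 1) (c : Int) 0 = sval 1 c := by
  intro c hc
  rw [PySem.List.pyGetD_natCast, getD_set_replicate _ _ _ _ (by omega)]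
  by_cases h1 : c = 1
  · rw [if_pos h1, h1]
    unfold sval stir
    norm_num [pvMod]
  · rw [if_neg h1]
    rcases Nat.eq_zero_or_pos c with h0 | hpos
    · rw [sval_eq_zero 1 c (Or.inl h0)]
    · rw [sval_eq_zero 1 c (Or.inr (by omega))]

lemma replicate_entries (C r : Nat) : ∀ c : Nat, c ≤ C →
    PySem.List.pyGetD (List.replicate (C + 1) (0 : Int)) (c : Int) 0 = 0 := by
  intro c hc
  rw [PySem.List.pyGetD_natCast]
  exact getD_replicate' _ _ _ _ (by omega)

lemma outerA (N C : Nat) (hN : 1 ≤ N) (hC : 1 ≤ C) : ∀ R : Nat, 1 ≤ R → R ≤ N →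
    ((PySem.List.pyRange 2 ((R : Int) + 1) 1).foldl (stepA (C : Int)) (arrInitA (N : Int) (C : Int))).length = N + 1
    ∧ (∀ r : Nat, r ≤ R →
        (PySem.List.pyGetD ((PySem.List.pyRange 2 ((R : Int) + 1) 1).foldl (stepA (C : Int)) (arrInitA (N : Int) (C : Int))) (r : Int) []).length = C + 1
        ∧ ∀ c : Nat, c ≤ C →
            PySem.List.pyGetD (PySem.List.pyGetD ((PySem.List.pyRange 2 ((R : Int) + 1) 1).foldl (stepA (C : Int)) (arrInitA (N : Int) (C : Int))) (r : Int) []) (c : Int) 0 = sval r c)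
    ∧ (∀ r : Nat, R < r → r ≤ N →
        PySem.List.pyGetD ((PySem.List.pyRange 2 ((R : Int) + 1) 1).foldl (stepA (C : Int)) (arrInitA (N : Int) (C : Int))) (r : Int) [] = List.replicate (C + 1) 0) := by
  intro R hR1
  induction R, hR1 using Nat.le_induction with
  | base =>
    intro h1N
    rw [show ((1 : Nat) : Int) + 1 = 2 by norm_num, PySem.List.pyRange_one_eq_nil (by omega), List.foldl_nil]
    refine ⟨initA_len N C hN, ?_, ?_⟩
    · intro r hr1
      rw [initA_row N C hN hC r (by omega)]
      interval_cases r
      · rw [if_neg (by omega)]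
        constructor
        · simp
        · intro c hc
          rw [replicate_entries C 0 c hc, sval_eq_zero 0 c (by omega)]
      · rw [if_pos rfl]
        constructor
        · simp
        · exact row1_entries C hC
    · intro r hr1 hrN
      rw [initA_row N C hN hC r (by omega), if_neg (by omega)]
  | succ R hR1 ih =>
    intro hRN
    obtain ⟨ihlen, ihrows, ihrep⟩ := ih (by omega)
    have hcast : ((R + 1 : Nat) : Int) + 1 = ((R : Int) + 1) + 1 := by push_cast; ring
    rw [hcast, PySem.List.pyRange_one_succ_right (by omega), List.foldl_append,
        List.foldl_cons, List.foldl_nil]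
    set acc := (PySem.List.pyRange 2 ((R : Int) + 1) 1).foldl (stepA (C : Int)) (arrInitA (N : Int) (C : Int)) with hacc
    -- one outer step = the inner fold
    have hmin : min (C : Int) ((R : Int) + 1) = ((min C (R + 1) : Nat) : Int) := by
      push_cast; rfl
    have hstep : stepA (C : Int) acc ((R : Int) + 1)
        = (PySem.List.pyRange 1 (((min C (R + 1) : Nat) : Int) + 1) 1).foldl (innerBodyA ((R : Int) + 1)) acc := by
      unfold stepA
      rw [hmin]
    rw [hstep]
    have ecast : ((R + 1 : Nat) : Int) = (R : Int) + 1 := by push_cast; ring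
    have hprev' : ∀ c : Nat, c ≤ C →
        PySem.List.pyGetD (PySem.List.pyGetD acc (R : Int) []) (c : Int) 0 = sval R c :=
      (ihrows R le_rfl).2
    have hrow' : PySem.List.pyGetD acc ((R : Int) + 1) [] = List.replicate (C + 1) 0 := by
      rw [← ecast]
      exact ihrep (R + 1) (by omega) (by omega)
    obtain ⟨flen, foth, frlen, fent⟩ :=
      innerA C N R hR1 (by omega) acc ihlen hprev' hrow' (min C (R + 1)) le_rfl
    refine ⟨flen, ?_, ?_⟩
    · intro r hr
      by_cases hrR : r ≤ R
      · rw [foth r (by omega)]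
        exact ihrows r hrR
      · have hrEq : r = R + 1 := by omega
        subst hrEq
        rw [ecast]
        refine ⟨frlen, ?_⟩
        intro c hc
        rw [fent c hc]
        rcases Nat.eq_zero_or_pos c with h0 | hpos
        · rw [if_neg (by omega), sval_eq_zero (R + 1) c (Or.inl h0)]
        · by_cases hcm : c ≤ min C (R + 1)
          · rw [if_pos ⟨hpos, hcm⟩]
          · rw [if_neg (by omega), sval_eq_zero (R + 1) c (Or.inr (by omega))]
    · intro r hr hrN
      rw [foth r (by omega)]
      exact ihrep r (by omega) hrN

def bodyB (row : Int) (s : List Int) (col : Int) : List Int :=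
  PySem.List.pySetD s col
    (PySem.Int.mod (PySem.List.pyGetD s (col - 1) 0 + (row - 1) * PySem.List.pyGetD s col 0) pvMod)
def stepB (count : Int) (s : List Int) (row : Int) : List Int :=
  (PySem.List.pyRange (min count row) 0 (-1)).foldl (bodyB row) s
def sInitB (count : Int) : List Int :=
  PySem.List.pySetD (List.replicate (count + 1).toNat (0 : Int)) 1 1

lemma solution_alt_eq (n count : Int) : solution_alt n count =
    if count > n then 0 else
      PySem.Int.mod (PySem.List.pyGetD ((PySem.List.pyRange 2 (n + 1) 1).foldl (stepB count) (sInitB count)) count 0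
        * PySem.Int.powMod 2 (n - count).toNat pvMod) pvMod := rfl

lemma innerB (C R : Nat) (hR : 1 ≤ R) : ∀ m : Nat, m ≤ min C (R + 1) → ∀ s : List Int, s.length = C + 1 →
    (∀ c : Nat, c ≤ C → PySem.List.pyGetD s (c : Int) 0
      = if m < c ∧ c ≤ min C (R + 1) then ((stir (R + 1) c : Nat) : Int) % pvMod else ((stir R c : Nat) : Int) % pvMod) →
    ((PySem.List.pyRange (m : Int) 0 (-1)).foldl (bodyB ((R : Int) + 1)) s).length = C + 1
    ∧ ∀ c : Nat, c ≤ C → PySem.List.pyGetD ((PySem.List.pyRange (m : Int) 0 (-1)).foldl (bodyB ((R : Int) + 1)) s) (c : Int) 0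
      = if 0 < c ∧ c ≤ min C (R + 1) then ((stir (R + 1) c : Nat) : Int) % pvMod else ((stir R c : Nat) : Int) % pvMod := by
  intro m
  induction m with
  | zero =>
    intro _ s hs hent
    rw [show ((0 : Nat) : Int) = 0 by simp, PySem.List.pyRange_neg_one_eq_nil le_rfl, List.foldl_nil]
    exact ⟨hs, hent⟩
  | succ m ih =>
    intro hm1 s hs hent
    have hmC : m + 1 ≤ C := by omega
    rw [PySem.List.pyRange_neg_one_cons (by positivity), List.foldl_cons]
    have e2 : ((m + 1 : Nat) : Int) - 1 = ((m : Nat) : Int) := by push_cast; ring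
    rw [e2]
    have e1 : (R : Int) + 1 - 1 = (R : Int) := by ring
    -- the value written at column m+1
    have hread1 : PySem.List.pyGetD s (((m + 1 : Nat) : Int) - 1) 0 = ((stir R m : Nat) : Int) % pvMod := by
      rw [e2, hent m (by omega), if_neg (by omega)]
    have hread2 : PySem.List.pyGetD s ((m + 1 : Nat) : Int) 0 = ((stir R (m + 1) : Nat) : Int) % pvMod := by
      rw [hent (m + 1) hmC, if_neg (by omega)]
    have hv : PySem.Int.mod (PySem.List.pyGetD s (((m + 1 : Nat) : Int) - 1) 0
        + ((R : Int) + 1 - 1) * PySem.List.pyGetD s ((m + 1 : Nat) : Int) 0) pvMod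
        = ((stir (R + 1) (m + 1) : Nat) : Int) % pvMod := by
      rw [hread1, hread2, e1, PySem.Int.mod_eq_emod_of_pos (by norm_num [pvMod]), emod_addmul]
      congr 1
      rw [stir_rec R (m + 1) hR (by omega)]
      push_cast
      simp
    have hbody : bodyB ((R : Int) + 1) s ((m + 1 : Nat) : Int)
        = PySem.List.pySetD s ((m + 1 : Nat) : Int) (((stir (R + 1) (m + 1) : Nat) : Int) % pvMod) := by
      unfold bodyB
      rw [hv]
    rw [hbody]
    apply ih (by omega)
    · rw [PySem.List.length_pySetD, hs]
    · intro c hc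
      rw [PySem.List.pyGetD_pySetD_natCast s (m + 1) c _ 0 (by omega)]
      by_cases hcm : c = m + 1
      · rw [if_pos hcm, hcm, if_pos (by omega)]
      · rw [if_neg hcm, hent c hc]
        by_cases h1 : m + 1 < c ∧ c ≤ min C (R + 1)
        · rw [if_pos h1, if_pos (by omega)]
        · rw [if_neg h1, if_neg (by omega)]

lemma sInitB_entries (C : Nat) (hC : 1 ≤ C) :
    (sInitB (C : Int)).length = C + 1
    ∧ ∀ c : Nat, c ≤ C → PySem.List.pyGetD (sInitB (C : Int)) (c : Int) 0 = ((stir 1 c : Nat) : Int) % pvMod := by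
  unfold sInitB
  have hcnt : ((C : Int) + 1).toNat = C + 1 := by omega
  rw [hcnt, PySem.List.pySetD_of_nonneg _ _ (by norm_num : (0:Int) ≤ 1), Int.toNat_one]
  constructor
  · rw [List.length_set, List.length_replicate]
  · intro c hc
    rw [PySem.List.pyGetD_natCast, getD_set_replicate _ _ _ _ (by omega)]
    by_cases h1 : c = 1
    · rw [if_pos h1, h1]
      unfold stir
      norm_num [pvMod]
    · rw [if_neg h1]
      rcases Nat.eq_zero_or_pos c with h0 | hpos
      · rw [h0, stir_zero]; simp
      · rw [stir_gt (show 1 < c by omega)]; simp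

lemma outerB (N C : Nat) (hN : 1 ≤ N) (hC : 1 ≤ C) : ∀ R : Nat, 1 ≤ R → R ≤ N →
    ((PySem.List.pyRange 2 ((R : Int) + 1) 1).foldl (stepB (C : Int)) (sInitB (C : Int))).length = C + 1
    ∧ ∀ c : Nat, c ≤ C →
        PySem.List.pyGetD ((PySem.List.pyRange 2 ((R : Int) + 1) 1).foldl (stepB (C : Int)) (sInitB (C : Int))) (c : Int) 0
        = ((stir R c : Nat) : Int) % pvMod := by
  intro R hR1
  induction R, hR1 using Nat.le_induction with
  | base =>
    intro _
    rw [show ((1 : Nat) : Int) + 1 = 2 by norm_num, PySem.List.pyRange_one_eq_nil (by omega), List.foldl_nil]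
    exact sInitB_entries C hC
  | succ R hR1 ih =>
    intro hRN
    obtain ⟨ihlen, ihent⟩ := ih (by omega)
    have hcast : ((R + 1 : Nat) : Int) + 1 = ((R : Int) + 1) + 1 := by push_cast; ring
    rw [hcast, PySem.List.pyRange_one_succ_right (by omega), List.foldl_append,
        List.foldl_cons, List.foldl_nil]
    set acc := (PySem.List.pyRange 2 ((R : Int) + 1) 1).foldl (stepB (C : Int)) (sInitB (C : Int)) with hacc
    have hmin : min (C : Int) ((R : Int) + 1) = ((min C (R + 1) : Nat) : Int) := by
      push_cast; rfl
    have hstep : stepB (C : Int) acc ((R : Int) + 1)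
        = (PySem.List.pyRange ((min C (R + 1) : Nat) : Int) 0 (-1)).foldl (bodyB ((R : Int) + 1)) acc := by
      unfold stepB
      rw [hmin]
    rw [hstep]
    obtain ⟨flen, fent⟩ := innerB C R hR1 (min C (R + 1)) le_rfl acc ihlen (by
      intro c hc
      rw [if_neg (by omega)]
      exact ihent c hc)
    refine ⟨flen, ?_⟩
    intro c hc
    rw [fent c hc]
    rcases Nat.eq_zero_or_pos c with h0 | hpos
    · rw [if_neg (by omega), h0, stir_zero, stir_zero]
    · by_cases hcm : c ≤ min C (R + 1)
      · rw [if_pos ⟨hpos, hcm⟩]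
      · rw [if_neg (by omega), stir_gt (show R < c by omega), stir_gt (show R + 1 < c by omega)]

theorem main_equiv (n count : Int) (hn : 1 ≤ n) (hc : 1 ≤ count) :
    solution n count = solution_alt n count := by
  obtain ⟨N, rfl⟩ : ∃ N : Nat, n = (N : Int) := ⟨n.toNat, by omega⟩
  obtain ⟨C, rfl⟩ : ∃ C : Nat, count = (C : Int) := ⟨count.toNat, by omega⟩
  have hN : 1 ≤ N := by exact_mod_cast hn
  have hC : 1 ≤ C := by exact_mod_cast hc
  rw [solution_eq, solution_alt_eq]
  rw [((outerA N C hN hC N hN le_rfl).2.1 N le_rfl).2 C le_rfl]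
  by_cases hgt : (C : Int) > (N : Int)
  · rw [if_pos hgt]
    exact sval_eq_zero N C (Or.inr (by exact_mod_cast hgt))
  · rw [if_neg hgt]
    have hCN : C ≤ N := by exact_mod_cast not_lt.mp hgt
    rw [(outerB N C hN hC N hN le_rfl).2 C le_rfl]
    have htn : ((N : Int) - (C : Int)).toNat = N - C := by omega
    rw [htn]
    show sval N C = PySem.Int.mod (((stir N C : Nat) : Int) % pvMod * PySem.Int.mod (2 ^ (N - C)) pvMod) pvMod
    rw [PySem.Int.mod_eq_emod_of_pos (by norm_num [pvMod]),
        PySem.Int.mod_eq_emod_of_pos (by norm_num [pvMod]), ← Int.mul_emod]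
    unfold sval
    congr 1
    push_cast
    ring

-- ===== VERDICT helpers end =====

-- ===== VERDICT (by name: the statement is the Claim_ definition above) =====
theorem solution_spec : Claim_equal_solution := by
  intro n count _ hpre
  obtain ⟨hn, hc⟩ := hpre
  show solution n count = solution_alt n count
  exact main_equiv n count hn hc
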